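-- pv_equiv track=rewrite | github.com/sruthisrikondeti/Accenture | Max_exponents.py | max_ex
-- ===== SOURCE A (Python) =====
-- def exponent(n):
--     ex=0
--     while n%2==0:
--         n=n//2
--         ex+=1
--     return ex
--
-- def max_ex(a,b):
--     max_num=a
--     max_exp=exponent(a)
--     for i in range(a+1,b+1):
--         current_ex=exponent(i)
--         if(current_ex>max_exp )or (current_ex==max_exp and i<max_num):
--             max_exp=current_ex
--             max_num=i
--     return max_num
-- ===== SOURCE B (Python) =====
-- def max_ex(a, b):
--     # Instead of scanning every i in [a, b] (O((b-a) log b)), climb powers of two: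
--     # keep the smallest multiple of 2**k inside [a, b] for the largest k that has one.
--     if b < a:
--         return a
--     best = a
--     p = 2
--     while True:
--         m = -(-a // p) * p  # smallest multiple of p that is >= a
--         if m > b:
--             return best
--         best = m
--         p *= 2
-- ===== Notes on version B (the rewrite author's own statement) =====
-- stated objective: faster
-- what changed: Instead of computing the 2-adic exponent of every integer in [a,b], B doubles a power of two p and keeps the smallest multiple of p inside [a,b] until no multiple fits, returning the last kept multiple.
import Mathlib
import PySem

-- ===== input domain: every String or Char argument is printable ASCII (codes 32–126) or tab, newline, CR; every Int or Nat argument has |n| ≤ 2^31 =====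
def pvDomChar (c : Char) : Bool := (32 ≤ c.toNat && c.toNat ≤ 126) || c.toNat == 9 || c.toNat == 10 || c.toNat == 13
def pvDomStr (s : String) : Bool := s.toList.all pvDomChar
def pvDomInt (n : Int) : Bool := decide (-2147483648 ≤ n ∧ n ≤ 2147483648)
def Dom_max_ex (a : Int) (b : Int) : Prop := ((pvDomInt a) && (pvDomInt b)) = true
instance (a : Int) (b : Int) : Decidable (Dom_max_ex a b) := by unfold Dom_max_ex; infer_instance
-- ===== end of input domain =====

-- B replaces A's scan of every i in [a,b] by doubling a power of two and keeping the
-- smallest in-range multiple, which is asymptotically faster (O(log b) vs O((b-a)·log b)).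

-- ===== PORT A =====
-- exponent(n): the while loop becomes the structural recursion on |n|; the 'n ≠ 0'
-- guard only makes the recursion total (Python diverges at n = 0, excluded by Pre_).
def pvExp (n : Int) : Int :=
  if h : n ≠ 0 ∧ PySem.Int.mod n 2 = 0 then pvExp (PySem.Int.floordiv n 2) + 1 else 0
termination_by n.natAbs
decreasing_by
  obtain ⟨hn, hm⟩ := h
  have hd : (2:Int) ∣ n := by
    have := PySem.Int.mod_eq_zero_iff_dvd n 2
    omega
  obtain ⟨k, hk⟩ := hd
  have : PySem.Int.floordiv n 2 = k := by
    rw [PySem.Int.floordiv_eq_ediv_of_pos (by norm_num : (0:Int) < 2)]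
    omega
  rw [this]
  subst hk
  simp [Int.natAbs_mul]
  omega

def max_ex (a : Int) (b : Int) : Int :=
  ((PySem.List.pyRange (a+1) (b+1) 1).foldl
    (fun (s : Int × Int) i =>
      let current_ex := pvExp i
      if current_ex > s.2 ∨ (current_ex = s.2 ∧ i < s.1) then (i, current_ex) else s)
    (a, pvExp a)).1

-- ===== PORT B =====
-- the 'while True' loop of Source B; fuel 64 only makes it total (on Pre_ it is never
-- exhausted: the loop stops once p exceeds max(b, -a), proved below).
def pvAltLoop (a b : Int) : Int → Int → Nat → Int
  | best, _, 0 => best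
  | best, p, fuel+1 =>
    let m := -(PySem.Int.floordiv (-a) p) * p
    if m > b then best else pvAltLoop a b m (p * 2) fuel

def max_ex_alt (a : Int) (b : Int) : Int :=
  if b < a then a else pvAltLoop a b a 2 64

-- ===== PRECONDITION & SPEC =====
-- Pre_ excludes exactly the inputs where Python A never returns: exponent(0) loops
-- forever, reached when a = 0 or when 0 lies in range(a+1, b+1) (a < 0 ≤ b).
def Pre_max_ex (a : Int) (b : Int) : Prop := a ≠ 0 ∧ ¬ (a < 0 ∧ 0 ≤ b)
instance (a : Int) (b : Int) : Decidable (Pre_max_ex a b) := by unfold Pre_max_ex; infer_instance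
def pvWitness_max_ex : Int × Int := (3, 10)

def Spec_max_ex (a : Int) (b : Int) (out : Int) : Prop := out = max_ex_alt a b
instance (a : Int) (b : Int) (out : Int) : Decidable (Spec_max_ex a b out) := by unfold Spec_max_ex; infer_instance

-- ===== CLAIM (what is proved, stated in full; the proofs are below) =====
def Claim_equal_max_ex : Prop := ∀ (a : Int) (b : Int), Dom_max_ex a b → Pre_max_ex a b → Spec_max_ex a b (max_ex a b)

-- ===== LEMMAS AND PROOFS =====

-- The common specification both programs satisfy: m is the smallest element of
-- [a,b] with maximal pvExp (earliest maximum of A's ascending scan).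
def IsBest (a b m : Int) : Prop :=
  a ≤ m ∧ m ≤ b ∧ (∀ x, a ≤ x → x ≤ b → pvExp x ≤ pvExp m) ∧
    (∀ x, a ≤ x → x ≤ b → pvExp x = pvExp m → m ≤ x)

theorem IsBest_unique {a b m m' : Int} (h : IsBest a b m) (h' : IsBest a b m') : m = m' := by
  obtain ⟨h1, h2, h3, h4⟩ := h
  obtain ⟨h1', h2', h3', h4'⟩ := h'
  have e1 := h3 m' h1' h2'
  have e2 := h3' m h1 h2
  have := h4 m' h1' h2' (le_antisymm e1 e2)
  have := h4' m h1 h2 (le_antisymm e2 e1)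
  omega

theorem pvExp_spec (n : Int) (hn : n ≠ 0) :
    0 ≤ pvExp n ∧ (2:Int) ^ (pvExp n).toNat ∣ n ∧ ¬ (2:Int) ^ ((pvExp n).toNat + 1) ∣ n := by
  induction n using pvExp.induct with
  | case1 n h ih =>
    obtain ⟨-, hm⟩ := h
    have hd : (2:Int) ∣ n := by have := PySem.Int.mod_eq_zero_iff_dvd n 2; omega
    obtain ⟨k, hk⟩ := hd
    have hfd : PySem.Int.floordiv n 2 = k := by
      rw [PySem.Int.floordiv_eq_ediv_of_pos (by norm_num : (0:Int) < 2)]; omega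
    have hk0 : k ≠ 0 := by rintro rfl; simp at hk; exact hn hk
    rw [hfd] at ih
    obtain ⟨ih0, ihd, ihnd⟩ := ih hk0
    rw [pvExp, dif_pos ⟨hn, hm⟩, hfd]
    refine ⟨by omega, ?_, ?_⟩
    · have : (pvExp k + 1).toNat = (pvExp k).toNat + 1 := by omega
      rw [this, pow_succ, hk]
      exact mul_comm (2:Int) _ ▸ mul_dvd_mul_left 2 ihd |>.trans (by rw [mul_comm])
    · have h1 : (pvExp k + 1).toNat + 1 = ((pvExp k).toNat + 1) + 1 := by omega
      rw [h1]
      intro hcon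
      apply ihnd
      rw [pow_succ] at hcon
      rw [hk] at hcon
      have h2 : (2:Int) ≠ 0 := by norm_num
      rcases hcon with ⟨c, hc⟩
      exact ⟨c, by nlinarith [hc]⟩
  | case2 n h =>
    have hm : PySem.Int.mod n 2 ≠ 0 := by tauto
    have hnd : ¬ (2:Int) ∣ n := by have := PySem.Int.mod_eq_zero_iff_dvd n 2; omega
    rw [pvExp, dif_neg h]
    simpa using hnd

theorem dvd_le_pvExp {n : Int} (hn : n ≠ 0) {k : Nat} (hk : (2:Int) ^ k ∣ n) :
    (k : Int) ≤ pvExp n := by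
  obtain ⟨h0, hd, hnd⟩ := pvExp_spec n hn
  by_contra hlt
  push_neg at hlt
  have : (pvExp n).toNat + 1 ≤ k := by omega
  exact hnd ((pow_dvd_pow 2 this).trans hk)

theorem pvExp_eq_of_dvd {n : Int} (hn : n ≠ 0) {k : Nat}
    (hk : (2:Int) ^ k ∣ n) (hle : pvExp n ≤ (k : Int)) : pvExp n = (k : Int) :=
  le_antisymm hle (dvd_le_pvExp hn hk)

theorem pvExp_dvd_of_le {n : Int} (hn : n ≠ 0) {k : Nat} (hk : (k : Int) ≤ pvExp n) :
    (2:Int) ^ k ∣ n := by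
  obtain ⟨h0, hd, -⟩ := pvExp_spec n hn
  exact (pow_dvd_pow 2 (by omega : k ≤ (pvExp n).toNat)).trans hd

-- ===== A-side: the fold computes the IsBest element =====

theorem foldA_spec (a : Int) : ∀ (n : Nat) (b : Int), b = a + n →
    (((PySem.List.pyRange (a+1) (b+1) 1).foldl
      (fun (s : Int × Int) i =>
        let current_ex := pvExp i
        if current_ex > s.2 ∨ (current_ex = s.2 ∧ i < s.1) then (i, current_ex) else s)
      (a, pvExp a)).2
      = pvExp ((PySem.List.pyRange (a+1) (b+1) 1).foldl
      (fun (s : Int × Int) i =>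
        let current_ex := pvExp i
        if current_ex > s.2 ∨ (current_ex = s.2 ∧ i < s.1) then (i, current_ex) else s)
      (a, pvExp a)).1) ∧
    IsBest a b (((PySem.List.pyRange (a+1) (b+1) 1).foldl
      (fun (s : Int × Int) i =>
        let current_ex := pvExp i
        if current_ex > s.2 ∨ (current_ex = s.2 ∧ i < s.1) then (i, current_ex) else s)
      (a, pvExp a)).1) := by
  intro n
  induction n with
  | zero =>
    intro b hb
    have hb' : b = a := by omega
    subst hb'
    rw [PySem.List.pyRange_one_eq_nil (by omega)]
    simp only [List.foldl_nil]
    refine ⟨trivial, le_refl _, le_refl _, ?_, ?_⟩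
    · intro x hx1 hx2; have hxa : x = _ := le_antisymm hx2 hx1
      rw [hxa]
    · intro x hx1 hx2 _; omega
  | succ n ih =>
    intro b hb
    have hsplit : PySem.List.pyRange (a+1) (b+1) 1
        = PySem.List.pyRange (a+1) ((a+n)+1) 1 ++ [(a+n)+1] := by
      have h1 : b + 1 = ((a+n)+1) + 1 := by push_cast [hb]; ring
      rw [h1, PySem.List.pyRange_one_succ_right (by omega)]
    obtain ⟨hinv, h1, h2, h3, h4⟩ := ih (a+n) rfl
    set f := (fun (s : Int × Int) i =>
        let current_ex := pvExp i
        if current_ex > s.2 ∨ (current_ex = s.2 ∧ i < s.1) then (i, current_ex) else s)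
    set st := (PySem.List.pyRange (a+1) ((a+n)+1) 1).foldl f (a, pvExp a) with hst
    have hb' : b = (a+n)+1 := by push_cast [hb]; ring
    rw [hsplit, List.foldl_append]
    rw [← hst]
    simp only [List.foldl_cons, List.foldl_nil]
    show (f st ((a+n)+1)).2 = pvExp (f st ((a+n)+1)).1 ∧ IsBest a b (f st ((a+n)+1)).1
    have hlt : ¬ ((a:Int)+n+1 < st.1) := by omega
    by_cases hcase : pvExp ((a:Int)+n+1) > st.2
    · have : f st ((a:Int)+n+1) = ((a:Int)+n+1, pvExp ((a:Int)+n+1)) := by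
        simp only [f]
        rw [if_pos (Or.inl hcase)]
      rw [this]
      rw [hinv] at hcase
      dsimp only
      refine ⟨rfl, by omega, by omega, ?_, ?_⟩
      · intro x hx1 hx2
        rcases (by omega : x ≤ a + n ∨ x = a + n + 1) with h | h
        · exact le_of_lt (lt_of_le_of_lt (h3 x hx1 h) hcase)
        · rw [h]
      · intro x hx1 hx2 hxe
        rcases (by omega : x ≤ a + n ∨ x = a + n + 1) with h | h
        · exact absurd hxe (by have := h3 x hx1 h; omega)
        · omega
    · have : f st ((a:Int)+n+1) = st := by
        simp only [f]
        rw [if_neg]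
        rintro (hc | ⟨-, hc⟩)
        · exact hcase hc
        · exact hlt hc
      rw [this]
      rw [hinv] at hcase
      refine ⟨hinv, h1, by omega, ?_, ?_⟩
      · intro x hx1 hx2
        rcases (by omega : x ≤ a + n ∨ x = a + n + 1) with h | h
        · exact h3 x hx1 h
        · rw [h]; omega
      · intro x hx1 hx2 hxe
        rcases (by omega : x ≤ a + n ∨ x = a + n + 1) with h | h
        · exact h4 x hx1 h hxe
        · omega

-- ===== B-side: ceiling multiples =====

-- -(−a // p) * p, the smallest multiple of p that is ≥ a  (p > 0)
def ceilMul (a p : Int) : Int := -(PySem.Int.floordiv (-a) p) * p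

theorem ceilMul_facts (a p : Int) (hp : 0 < p) :
    a ≤ ceilMul a p ∧ p ∣ ceilMul a p ∧ ceilMul a p - p < a := by
  have h := (PySem.Int.neg_floordiv_neg_eq_iff_of_pos (a := a) (b := p)
      (q := -(PySem.Int.floordiv (-a) p)) hp).mp rfl
  refine ⟨h.2, by unfold ceilMul; exact dvd_mul_left p _, ?_⟩
  unfold ceilMul
  nlinarith [h.1]

theorem ceilMul_min (a p x : Int) (hp : 0 < p) (hd : p ∣ x) (hx : a ≤ x) :
    ceilMul a p ≤ x := by
  obtain ⟨-, -, h3⟩ := ceilMul_facts a p hp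
  obtain ⟨t, ht⟩ := hd
  set q := -(PySem.Int.floordiv (-a) p) with hq
  have hlt : (q - 1) * p < t * p := by unfold ceilMul at h3; nlinarith [ht, hx]
  have : q - 1 < t := lt_of_mul_lt_mul_right hlt (le_of_lt hp)
  have : q ≤ t := by omega
  calc ceilMul a p = q * p := by rw [ceilMul]
    _ ≤ t * p := by nlinarith
    _ = x := by rw [ht, mul_comm]

theorem stop_of_big (a b t : Int) (hs : 0 < a ∨ b < 0) (hab : a ≤ b)
    (ht : 0 < t) (hbig : max b (-a) < t) : b < ceilMul a t := by
  obtain ⟨h1, h2, -⟩ := ceilMul_facts a t ht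
  by_contra hle
  push_neg at hle
  rcases hs with hpos | hneg
  · -- ceilMul ≥ a > 0 and divisible by t ⇒ ≥ t > b
    obtain ⟨c, hc⟩ := h2
    have hc0 : 0 < c := by nlinarith
    have : t ≤ ceilMul a t := by nlinarith
    have : b < t := lt_of_le_of_lt (le_max_left b (-a)) hbig
    omega
  · -- ceilMul ≤ b < 0 and divisible ⇒ ≤ -t, but ceilMul ≥ a > -t
    obtain ⟨c, hc⟩ := h2
    have hc0 : c < 0 := by nlinarith
    have hle' : ceilMul a t ≤ -t := by nlinarith
    have : -a < t := lt_of_le_of_lt (le_max_right b (-a)) hbig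
    omega

theorem loop_spec (a b : Int) (hs : 0 < a ∨ b < 0) (hab : a ≤ b) :
    ∀ (fuel j : Nat), ceilMul a (2^j) ≤ b → max b (-a) < 2^(j+fuel+1) →
    ∃ K : Nat, j ≤ K ∧ pvAltLoop a b (ceilMul a (2^j)) (2^(j+1)) fuel = ceilMul a (2^K) ∧
      ceilMul a (2^K) ≤ b ∧ b < ceilMul a (2^(K+1)) := by
  intro fuel
  induction fuel with
  | zero =>
    intro j hle hbig
    refine ⟨j, le_refl j, rfl, hle, ?_⟩
    exact stop_of_big a b (2^(j+1)) hs hab (by positivity) (by simpa using hbig)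
  | succ fuel ih =>
    intro j hle hbig
    rw [pvAltLoop]
    have hm : -(PySem.Int.floordiv (-a) (2^(j+1))) * (2^(j+1)) = ceilMul a (2^(j+1)) := rfl
    simp only [hm]
    by_cases hstop : ceilMul a (2^(j+1)) > b
    · rw [if_pos hstop]
      exact ⟨j, le_refl j, rfl, hle, hstop⟩
    · rw [if_neg hstop]
      push_neg at hstop
      have hpow : (2:Int)^(j+1) * 2 = 2^(j+2) := by ring
      rw [hpow]
      obtain ⟨K, hK1, hK2, hK3, hK4⟩ := ih (j+1) hstop (by
        have : j + 1 + fuel + 1 = j + (fuel+1) + 1 := by omega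
        rw [this]; exact hbig)
      exact ⟨K, by omega, hK2, hK3, hK4⟩

theorem bestK_IsBest (a b : Int) (hs : 0 < a ∨ b < 0) (K : Nat)
    (h1 : ceilMul a (2^K) ≤ b) (h2 : b < ceilMul a (2^(K+1))) :
    IsBest a b (ceilMul a (2^K)) := by
  have hpK : (0:Int) < 2^K := by positivity
  have hpK1 : (0:Int) < 2^(K+1) := by positivity
  obtain ⟨hma, hmd, -⟩ := ceilMul_facts a (2^K) hpK
  set m := ceilMul a (2^K) with hm
  have hm0 : m ≠ 0 := by intro h0; rcases hs with h | h <;> omega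
  -- every x in [a,b] has pvExp x ≤ K
  have hub : ∀ x, a ≤ x → x ≤ b → pvExp x ≤ (K : Int) := by
    intro x hx1 hx2
    have hx0 : x ≠ 0 := by intro h0; rcases hs with h | h <;> omega
    by_contra hgt
    push_neg at hgt
    have hd : (2:Int)^(K+1) ∣ x := pvExp_dvd_of_le hx0 (by push_cast; omega)
    have := ceilMul_min a (2^(K+1)) x hpK1 hd hx1
    omega
  have hEm : pvExp m = (K : Int) := pvExp_eq_of_dvd hm0 hmd (hub m hma h1)
  refine ⟨hma, h1, ?_, ?_⟩
  · intro x hx1 hx2; rw [hEm]; exact hub x hx1 hx2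
  · intro x hx1 hx2 hxe
    have hx0 : x ≠ 0 := by intro h0; rcases hs with h | h <;> omega
    rw [hEm] at hxe
    have hd : (2:Int)^K ∣ x := pvExp_dvd_of_le hx0 (le_of_eq hxe.symm)
    exact ceilMul_min a (2^K) x hpK hd hx1

theorem ceilMul_one (a : Int) : ceilMul a 1 = a := by
  unfold ceilMul
  rw [PySem.Int.floordiv_eq_ediv_of_pos (by norm_num : (0:Int) < 1)]
  omega

theorem altB_IsBest (a b : Int) (hdom : Dom_max_ex a b) (hs : 0 < a ∨ b < 0)
    (hab : a ≤ b) : IsBest a b (max_ex_alt a b) := by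
  have hdom' : -2147483648 ≤ a ∧ a ≤ 2147483648 ∧ -2147483648 ≤ b ∧ b ≤ 2147483648 := by
    unfold Dom_max_ex pvDomInt at hdom
    simp only [Bool.and_eq_true, decide_eq_true_eq] at hdom
    omega
  have h0 : ceilMul a (2^(0:Nat)) ≤ b := by rw [pow_zero, ceilMul_one]; exact hab
  have hbig : max b (-a) < 2^((0:Nat)+64+1) := by
    have : ((2:Int))^((0:Nat)+64+1) = 36893488147419103232 := by norm_num
    rw [this]
    rcases le_total b (-a) with h | h <;> [rw [max_eq_right h]; rw [max_eq_left h]] <;> omega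
  obtain ⟨K, -, hK2, hK3, hK4⟩ := loop_spec a b hs hab 64 0 h0 hbig
  have : max_ex_alt a b = ceilMul a (2^K) := by
    unfold max_ex_alt
    rw [if_neg (by omega)]
    have e1 : ceilMul a (2^(0:Nat)) = a := by rw [pow_zero, ceilMul_one]
    have e2 : (2:Int)^((0:Nat)+1) = 2 := by norm_num
    rw [e1, e2] at hK2
    exact hK2
  rw [this]
  exact bestK_IsBest a b hs K hK3 hK4

-- ===== VERDICT (by name: the statement is the Claim_ definition above) =====
theorem max_ex_spec : Claim_equal_max_ex := by
  intro a b hdom hpre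
  unfold Spec_max_ex
  obtain ⟨ha0, hneg⟩ := hpre
  by_cases hab : b < a
  · -- empty range on both sides: both return a
    have hA : max_ex a b = a := by
      unfold max_ex
      rw [PySem.List.pyRange_one_eq_nil (by omega)]
      rfl
    have hB : max_ex_alt a b = a := by unfold max_ex_alt; rw [if_pos hab]
    rw [hA, hB]
  · push_neg at hab
    have hs : 0 < a ∨ b < 0 := by
      rcases lt_trichotomy a 0 with h | h | h
      · right; by_contra hb; push_neg at hb; exact hneg ⟨h, hb⟩
      · exact absurd h ha0
      · left; exact h
    have hBbest := altB_IsBest a b hdom hs hab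
    have hAbest : IsBest a b (max_ex a b) := by
      have := (foldA_spec a (b - a).toNat b (by omega)).2
      unfold max_ex
      exact this
    exact IsBest_unique hAbest hBbest
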